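-- pv_equiv track=rewrite | github.com/ronykoz/GitHubProjectManager | src/project_manager.py | is_matching_issue
-- ===== SOURCE A (Python) =====
-- def is_matching_issue(issue_labels, must_have_labels, cant_have_labels):
--     for label in must_have_labels:
--         if label not in issue_labels:
--             return False
--
--     for label in cant_have_labels:
--         if label in issue_labels:
--             return False
--
--     return True
-- ===== SOURCE B (Python) =====
-- def is_matching_issue(issue_labels, must_have_labels, cant_have_labels):
--     missing = set(must_have_labels)
--     cant = set(cant_have_labels)
--     for label in issue_labels:
--         if label in cant:
--             return False
--         missing.discard(label)
--     return not missing
-- ===== Notes on version B (the rewrite author's own statement) =====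
-- stated objective: alternative
-- what changed: Instead of scanning the must/cant lists against the issue labels, B makes a single pass over issue_labels, failing early on a forbidden label and crossing each seen label off a 'missing' set of required labels, finally checking that set is empty.
import Mathlib
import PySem

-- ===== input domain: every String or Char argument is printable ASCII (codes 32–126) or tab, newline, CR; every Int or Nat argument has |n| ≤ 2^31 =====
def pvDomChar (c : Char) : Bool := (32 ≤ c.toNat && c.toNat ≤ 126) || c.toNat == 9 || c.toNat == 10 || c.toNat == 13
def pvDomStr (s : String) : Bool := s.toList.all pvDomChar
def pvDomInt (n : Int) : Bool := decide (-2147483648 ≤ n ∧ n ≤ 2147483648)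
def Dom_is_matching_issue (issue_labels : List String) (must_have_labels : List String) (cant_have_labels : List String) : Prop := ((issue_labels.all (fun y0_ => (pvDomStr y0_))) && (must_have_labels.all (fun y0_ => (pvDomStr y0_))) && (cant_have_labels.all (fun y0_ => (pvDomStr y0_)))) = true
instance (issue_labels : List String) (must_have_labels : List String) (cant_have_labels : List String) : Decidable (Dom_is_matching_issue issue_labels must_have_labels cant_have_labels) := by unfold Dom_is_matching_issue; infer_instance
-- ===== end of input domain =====

-- B traverses issue_labels once, failing early on a forbidden label and crossing
-- seen labels off a 'missing' set of required ones, instead of A's two scans of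
-- the must/cant lists; objective: alternative.


-- ===== PORT A =====
-- second loop of A: 'for label in cant_have_labels: if label in issue_labels: return False'
def pvCantLoop (issue_labels : List String) : List String → Bool
  | [] => true
  | label :: rest =>
      if issue_labels.contains label then false
      else pvCantLoop issue_labels rest

-- first loop of A: 'for label in must_have_labels: if label not in issue_labels: return False'
def pvMustLoop (issue_labels : List String) (cant_have_labels : List String) : List String → Bool
  | [] => pvCantLoop issue_labels cant_have_labels
  | label :: rest =>
      if ¬ issue_labels.contains label then false
      else pvMustLoop issue_labels cant_have_labels rest

def is_matching_issue (issue_labels : List String) (must_have_labels : List String) (cant_have_labels : List String) : Bool :=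
  pvMustLoop issue_labels cant_have_labels must_have_labels

-- ===== PORT B =====
-- B's loop: 'for label in issue_labels: if label in cant: return False; missing.discard(label)'
-- then 'return not missing'
def pvScan (cant : PySem.Set String) : PySem.Set String → List String → Bool
  | missing, [] => missing.isEmpty
  | missing, label :: rest =>
      if PySem.Set.contains cant label then false
      else pvScan cant (PySem.Set.discard missing label) rest

def is_matching_issue_alt (issue_labels : List String) (must_have_labels : List String) (cant_have_labels : List String) : Bool :=
  pvScan (PySem.Set.ofList cant_have_labels) (PySem.Set.ofList must_have_labels) issue_labels

-- ===== PRECONDITION & SPEC =====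
def Spec_is_matching_issue (issue_labels : List String) (must_have_labels : List String) (cant_have_labels : List String) (out : Bool) : Prop := out = is_matching_issue_alt issue_labels must_have_labels cant_have_labels
instance (issue_labels : List String) (must_have_labels : List String) (cant_have_labels : List String) (out : Bool) : Decidable (Spec_is_matching_issue issue_labels must_have_labels cant_have_labels out) := by unfold Spec_is_matching_issue; infer_instance

-- ===== CLAIM (what is proved, stated in full; the proofs are below) =====
def Claim_equal_is_matching_issue : Prop := ∀ (issue_labels : List String) (must_have_labels : List String) (cant_have_labels : List String), Dom_is_matching_issue issue_labels must_have_labels cant_have_labels → Spec_is_matching_issue issue_labels must_have_labels cant_have_labels (is_matching_issue issue_labels must_have_labels cant_have_labels)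

-- ===== LEMMAS AND PROOFS =====
theorem pvCantLoop_eq_all (issue : List String) : ∀ (cant : List String),
    pvCantLoop issue cant = cant.all (fun l => !issue.contains l)
  | [] => by simp [pvCantLoop]
  | label :: rest => by
      simp [pvCantLoop, pvCantLoop_eq_all issue rest]

theorem pvMustLoop_eq_all (issue cant : List String) : ∀ (must : List String),
    pvMustLoop issue cant must =
      (must.all (fun l => issue.contains l) && pvCantLoop issue cant)
  | [] => by simp [pvMustLoop]
  | label :: rest => by
      simp [pvMustLoop, pvMustLoop_eq_all issue cant rest, Bool.and_assoc]

theorem pvScan_eq (cant : PySem.Set String) : ∀ (issue : List String) (missing : PySem.Set String),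
    pvScan cant missing issue =
      (issue.all (fun l => !PySem.Set.contains cant l) && decide (∀ x ∈ missing, x ∈ issue))
  | [], missing => by
      cases missing with
      | nil => simp [pvScan]
      | cons a l =>
          rw [pvScan]
          simp only [List.isEmpty_cons, List.all_nil, Bool.true_and]
          simp
          exact ⟨a, fun h => absurd rfl h⟩
  | label :: rest, missing => by
      by_cases h : PySem.Set.contains cant label = true
      · rw [pvScan, if_pos h]
        have hm : label ∈ cant := (PySem.Set.contains_iff _ _).mp h
        simp [hm]
      · rw [pvScan, if_neg h, pvScan_eq cant rest]
        simp only [List.all_cons, h, Bool.not_false, Bool.true_and]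
        congr 1
        rw [Bool.eq_iff_iff, decide_eq_true_iff, decide_eq_true_iff]
        constructor
        · intro hd x hx
          by_cases hxl : x = label
          · simp [hxl]
          · exact List.mem_cons_of_mem _
              (hd x ((PySem.Set.mem_discard _ _ _).mpr ⟨hx, hxl⟩))
        · intro hm x hx
          obtain ⟨hxm, hxl⟩ := (PySem.Set.mem_discard _ _ _).mp hx
          rcases List.mem_cons.mp (hm x hxm) with h' | h'
          · exact absurd h' hxl
          · exact h'

-- ===== VERDICT (by name: the statement is the Claim_ definition above) =====
theorem is_matching_issue_spec : Claim_equal_is_matching_issue := by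
  intro issue must cant _
  unfold Spec_is_matching_issue is_matching_issue is_matching_issue_alt
  rw [pvMustLoop_eq_all, pvCantLoop_eq_all, pvScan_eq, Bool.eq_iff_iff]
  simp only [Bool.and_eq_true, List.all_eq_true, decide_eq_true_iff,
    PySem.Set.contains_eq_listContains, List.contains_eq_mem, PySem.Set.mem_ofList,
    Bool.not_eq_true', decide_eq_false_iff_not]
  constructor
  · rintro ⟨hm, hc⟩
    exact ⟨fun l hl hlc => hc l hlc hl, fun x hx => hm x hx⟩
  · rintro ⟨hc, hm⟩
    exact ⟨fun l hl => hm l hl, fun l hl hli => hc l hli hl⟩
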